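-- pv_equiv track=rewrite | github.com/coolka1234/Tech-Interview-Pratice | python/stock_price.py | stockBuySell
-- ===== SOURCE A (Python) =====
-- def stockBuySell(A, N):
--     result = []
--
--     i = 0
--     while i < (N - 1):
--
--         while (i < N - 1) and (A[i + 1] <= A[i]):
--             i += 1
--
--         if i == N - 1:
--             break
--         buy = i
--         i += 1
--
--         while (i < N) and (A[i] >= A[i - 1]):
--             i += 1
--
--         sell = i - 1
--
--         result.append((buy, sell))
--
--     if not result:
--         return []
--     else:
--         return result
-- ===== SOURCE B (Python) =====
-- def stockBuySell(A, N):
--     # Single forward pass with a holding-state variable instead of nested index loops.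
--     result = []
--     buy = None
--     for i in range(1, N):
--         if A[i] > A[i - 1]:
--             if buy is None:
--                 buy = i - 1
--         elif A[i] < A[i - 1]:
--             if buy is not None:
--                 result.append((buy, i - 1))
--                 buy = None
--     if buy is not None:
--         result.append((buy, N - 1))
--     return result
-- ===== Notes on version B (the rewrite author's own statement) =====
-- stated objective: simpler
-- what changed: Replaced A's outer while-loop with two nested index-hunting while-loops (skip the descent, then climb the rise) by a single forward pass over adjacent pairs driven by a holding-state variable.
import Mathlib
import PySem

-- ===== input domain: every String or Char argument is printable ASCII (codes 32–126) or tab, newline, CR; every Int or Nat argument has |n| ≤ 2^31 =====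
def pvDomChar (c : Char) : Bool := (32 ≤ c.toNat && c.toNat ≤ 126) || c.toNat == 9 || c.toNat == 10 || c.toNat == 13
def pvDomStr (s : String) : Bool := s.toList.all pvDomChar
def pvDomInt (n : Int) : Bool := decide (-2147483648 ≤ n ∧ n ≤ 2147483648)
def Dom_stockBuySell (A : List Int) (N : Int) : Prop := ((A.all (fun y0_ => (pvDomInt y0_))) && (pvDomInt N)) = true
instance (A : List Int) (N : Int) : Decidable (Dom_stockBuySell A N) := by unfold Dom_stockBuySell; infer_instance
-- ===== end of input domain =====

-- B replaces A's nested index-hunting while-loops by a single adjacent-comparison pass with a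
-- holding-state variable (objective: simpler).

-- ===== PORT A =====
-- inner skip loop: `while (i < N - 1) and (A[i + 1] <= A[i]): i += 1`
def skipA (A : List Int) (N : Int) (i : Int) : Int :=
  if _h : i < N - 1 ∧ PySem.List.pyGetD A (i + 1) 0 ≤ PySem.List.pyGetD A i 0 then
    skipA A N (i + 1)
  else i
termination_by (N - 1 - i).toNat
decreasing_by exact (Int.toNat_lt_toNat (by omega)).mpr (by omega)

-- inner climb loop: `while (i < N) and (A[i] >= A[i - 1]): i += 1`
def climbA (A : List Int) (N : Int) (i : Int) : Int :=
  if _h : i < N ∧ PySem.List.pyGetD A (i - 1) 0 ≤ PySem.List.pyGetD A i 0 then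
    climbA A N (i + 1)
  else i
termination_by (N - i).toNat
decreasing_by exact (Int.toNat_lt_toNat (by omega)).mpr (by omega)

-- the loop counters never move backwards (cited by outerA's decreasing_by)
theorem skipA_ge (A : List Int) (N : Int) (i : Int) : i ≤ skipA A N i := by
  fun_induction skipA A N i with
  | case1 i h ih => omega
  | case2 i h => omega

theorem climbA_ge (A : List Int) (N : Int) (i : Int) : i ≤ climbA A N i := by
  fun_induction climbA A N i with
  | case1 i h ih => omega
  | case2 i h => omega

-- outer loop: `while i < (N - 1): …`
def outerA (A : List Int) (N : Int) (i : Int) (result : List (Int × Int)) : List (Int × Int) :=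
  if h : i < N - 1 then
    let j := skipA A N i
    if j = N - 1 then result
    else
      let k := climbA A N (j + 1)
      outerA A N k (result ++ [(j, k - 1)])
  else result
termination_by (N - 1 - i).toNat
decreasing_by
  have h1 := skipA_ge A N i
  have h2 := climbA_ge A N (skipA A N i + 1)
  exact (Int.toNat_lt_toNat (by omega)).mpr (by omega)

def stockBuySell (A : List Int) (N : Int) : List (Int × Int) :=
  let result := outerA A N 0 []
  if result = [] then [] else result

-- ===== PORT B =====
-- `for i in range(1, N):` with holding state `buy` (none = not holding)
def loopB (A : List Int) (N : Int) (i : Int) (buy : Option Int) (res : List (Int × Int)) :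
    List (Int × Int) :=
  if _h : i < N then
    if PySem.List.pyGetD A (i - 1) 0 < PySem.List.pyGetD A i 0 then
      loopB A N (i + 1) (if buy.isNone then some (i - 1) else buy) res
    else if PySem.List.pyGetD A i 0 < PySem.List.pyGetD A (i - 1) 0 then
      match buy with
      | some b => loopB A N (i + 1) none (res ++ [(b, i - 1)])
      | none => loopB A N (i + 1) none res
    else
      loopB A N (i + 1) buy res
  else
    match buy with
    | some b => res ++ [(b, N - 1)]
    | none => res
termination_by (N - i).toNat
decreasing_by all_goals exact (Int.toNat_lt_toNat (by omega)).mpr (by omega)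

def stockBuySell_alt (A : List Int) (N : Int) : List (Int × Int) :=
  loopB A N 1 none []

-- ===== PRECONDITION & SPEC =====
-- Pre_ excludes exactly the inputs on which the Python A raises IndexError:
-- N exceeding the list length while an element access is actually reached (N ≥ 2).
def Pre_stockBuySell (A : List Int) (N : Int) : Prop := N ≤ A.length ∨ N ≤ 1
instance (A : List Int) (N : Int) : Decidable (Pre_stockBuySell A N) := by
  unfold Pre_stockBuySell; infer_instance
def pvWitness_stockBuySell : List Int × Int := ([1, 3, 2, 5], 4)

def Spec_stockBuySell (A : List Int) (N : Int) (out : List (Int × Int)) : Prop :=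
  out = stockBuySell_alt A N
instance (A : List Int) (N : Int) (out : List (Int × Int)) : Decidable (Spec_stockBuySell A N out) := by
  unfold Spec_stockBuySell; infer_instance

-- ===== CLAIM (what is proved, stated in full; the proofs are below) =====
def Claim_equal_stockBuySell : Prop := ∀ (A : List Int) (N : Int), Dom_stockBuySell A N →
  Pre_stockBuySell A N → Spec_stockBuySell A N (stockBuySell A N)

-- ===== LEMMAS AND PROOFS =====

theorem skipA_le (A : List Int) (N : Int) (i : Int) (h : i ≤ N - 1) : skipA A N i ≤ N - 1 := by
  fun_induction skipA A N i with
  | case1 i h' ih => exact ih (by omega)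
  | case2 i h' => omega

theorem climbA_le (A : List Int) (N : Int) (i : Int) (h : i ≤ N) : climbA A N i ≤ N := by
  fun_induction climbA A N i with
  | case1 i h' ih => exact ih (by omega)
  | case2 i h' => omega

theorem skipA_stop (A : List Int) (N : Int) (i : Int) :
    ¬ (skipA A N i < N - 1 ∧
        PySem.List.pyGetD A (skipA A N i + 1) 0 ≤ PySem.List.pyGetD A (skipA A N i) 0) := by
  fun_induction skipA A N i with
  | case1 i h ih => exact ih
  | case2 i h => exact h

-- A's skip phase is a no-op stretch of B's loop in the non-holding state
theorem skip_loop (A : List Int) (N : Int) (i : Int) (res : List (Int × Int)) :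
    loopB A N (i + 1) none res = loopB A N (skipA A N i + 1) none res := by
  fun_induction skipA A N i with
  | case1 i h ih =>
    rw [loopB, dif_pos (show i + 1 < N by omega)]
    have hnot : ¬ PySem.List.pyGetD A (i + 1 - 1) 0 < PySem.List.pyGetD A (i + 1) 0 := by
      rw [show i + 1 - 1 = i by omega]; omega
    rw [if_neg hnot]
    split
    · exact ih
    · exact ih
  | case2 i h => rfl

-- A's climb phase is B's loop in the holding state
theorem climb_loop (A : List Int) (N : Int) (k : Int) (b : Int) (res : List (Int × Int)) :
    loopB A N k (some b) res =
      if climbA A N k < N then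
        loopB A N (climbA A N k + 1) none (res ++ [(b, climbA A N k - 1)])
      else res ++ [(b, N - 1)] := by
  fun_induction climbA A N k with
  | case1 k h ih =>
    rw [loopB, dif_pos h.1]
    rcases lt_or_eq_of_le h.2 with hlt | heq
    · rw [if_pos hlt]
      simpa using ih
    · rw [if_neg (by omega), if_neg (by omega)]
      exact ih
  | case2 k h =>
    by_cases hkN : k < N
    · have hlt : PySem.List.pyGetD A k 0 < PySem.List.pyGetD A (k - 1) 0 := by
        by_contra hc; exact h ⟨hkN, by omega⟩
      rw [if_pos hkN, loopB, dif_pos hkN, if_neg (by omega), if_pos hlt]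
    · rw [if_neg hkN, loopB, dif_neg hkN]

-- the whole of A's outer loop equals B's single pass (from the matching position, not holding)
theorem outer_loop (A : List Int) (N : Int) (i : Int) (res : List (Int × Int)) :
    outerA A N i res = loopB A N (i + 1) none res := by
  fun_induction outerA A N i res with
  | case1 i res h j hbreak =>
    -- break branch: skipA A N i = N - 1
    have hj : j = skipA A N i := rfl
    rw [hj] at hbreak
    rw [skip_loop, hbreak, loopB, dif_neg (by omega)]
  | case2 i res h j hne k ih =>
    -- trade branch
    have hj : j = skipA A N i := rfl
    have hk : k = climbA A N (j + 1) := rfl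
    rw [hk] at ih ⊢
    rw [hj] at ih hne ⊢
    have hjge := skipA_ge A N i
    have hjle := skipA_le A N i (by omega)
    have hjlt : skipA A N i < N - 1 := by omega
    have hstop := skipA_stop A N i
    have hrise : PySem.List.pyGetD A (skipA A N i) 0 < PySem.List.pyGetD A (skipA A N i + 1) 0 := by
      by_contra hc; exact hstop ⟨hjlt, by omega⟩
    rw [skip_loop]
    rw [loopB, dif_pos (show skipA A N i + 1 < N by omega)]
    rw [if_pos (by rw [show skipA A N i + 1 - 1 = skipA A N i by omega]; exact hrise)]
    have hclimb1 : climbA A N (skipA A N i + 1) = climbA A N (skipA A N i + 1 + 1) := by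
      rw [climbA,
        dif_pos ⟨by omega, by rw [show skipA A N i + 1 - 1 = skipA A N i by omega]; omega⟩]
    simp only [Option.isNone_none, if_true, show skipA A N i + 1 - 1 = skipA A N i by omega]
    rw [climb_loop, ← hclimb1]
    have hkle := climbA_le A N (skipA A N i + 1) (by omega)
    by_cases hkN : climbA A N (skipA A N i + 1) < N
    · rw [if_pos hkN, ih]
    · rw [if_neg hkN, ih, show climbA A N (skipA A N i + 1) = N by omega,
        loopB, dif_neg (by omega)]
  | case3 i res h => rw [loopB, dif_neg (by omega)]

-- ===== VERDICT (by name: the statement is the Claim_ definition above) =====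
theorem stockBuySell_spec : Claim_equal_stockBuySell := by
  intro A N _hD _hP
  show stockBuySell A N = stockBuySell_alt A N
  simp only [stockBuySell, stockBuySell_alt]
  have h := outer_loop A N 0 []
  rw [show (0 : Int) + 1 = 1 from rfl] at h
  rw [h]
  split
  · rename_i heq; exact heq.symm
  · rfl
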